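-- pv_equiv track=rewrite | github.com/aguscurii05/IP-Algo-I | Parciales/SegundoParcial/Parcial 3 (2024)/Parcial3.py | stock_productos
-- ===== SOURCE A (Python) =====
-- def stock_productos(stock_cambios:list[(str,int)])->dict[str,(int,int)]:
--     res:dict[str,(int,int)]={}
--     for elem in stock_cambios:
--         stock:int=elem[1] #segundo valor de la tupla
--         key:str=elem[0] #primer valor de la tupla(producto)
--         if key not in res:
--             res[key]=(stock,stock)
--         else:
--             max:int=res[key][1] #accedo al segundo valor(max stock) del segundo elemento(la tupla) con la clave(nombre del prod)
--             min:int=res[key][0] #accedo al segundo valor(min stock) del segundo elemento(la tupla) con la clave(nombre del prod)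
--             if stock>max:
--                 res[key]=(min,stock)
--
--             if stock<min:
--                res[key]=(stock,max)
--     return res
-- ===== SOURCE B (Python) =====
-- def stock_productos(stock_cambios: list[(str, int)]) -> dict[str, (int, int)]:
--     grupos: dict[str, list[int]] = {}
--     for prod, stock in stock_cambios:
--         grupos.setdefault(prod, []).append(stock)
--     return {prod: (min(vals), max(vals)) for prod, vals in grupos.items()}
-- ===== Notes on version B (the rewrite author's own statement) =====
-- stated objective: simpler
-- what changed: Replaces A's incremental four-branch running-(min,max) tuple update with a two-phase group-then-aggregate: one pass groups stock values per product via setdefault, a comprehension then maps each product to (min(values), max(values)).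
import Mathlib
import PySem

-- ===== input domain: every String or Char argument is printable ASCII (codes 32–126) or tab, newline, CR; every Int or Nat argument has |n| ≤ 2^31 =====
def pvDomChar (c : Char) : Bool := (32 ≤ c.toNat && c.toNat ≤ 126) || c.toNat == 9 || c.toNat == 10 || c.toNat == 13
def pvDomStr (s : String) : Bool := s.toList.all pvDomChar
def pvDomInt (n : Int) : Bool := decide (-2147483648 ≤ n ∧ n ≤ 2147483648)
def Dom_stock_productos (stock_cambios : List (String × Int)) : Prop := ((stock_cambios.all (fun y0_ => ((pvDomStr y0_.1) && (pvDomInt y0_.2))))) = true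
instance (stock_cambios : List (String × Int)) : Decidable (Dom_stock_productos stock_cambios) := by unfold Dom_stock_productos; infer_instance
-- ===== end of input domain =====

-- B groups all stock values per product in one pass, then maps each product to (min, max);
-- A maintains a running (min, max) tuple with a four-branch incremental update. Same values, same key order.

-- ===== PORT A =====
-- one iteration of A's for-loop body
def pvStepA (d : PySem.Dict String (Int × Int)) (elem : String × Int) : PySem.Dict String (Int × Int) :=
  let stock := elem.2
  let key := elem.1
  if d.contains key = false then
    d.insert key (stock, stock)
  else
    -- res[key] always succeeds here (key is present); default never used
    let mx := (d.getD key (0, 0)).2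
    let mn := (d.getD key (0, 0)).1
    let d1 := if stock > mx then d.insert key (mn, stock) else d
    if stock < mn then d1.insert key (stock, mx) else d1

def stock_productos (stock_cambios : List (String × Int)) : List (String × Int × Int) :=
  (stock_cambios.foldl pvStepA PySem.Dict.empty).items

-- ===== PORT B =====
def stock_productos_alt (stock_cambios : List (String × Int)) : List (String × Int × Int) :=
  let grupos := stock_cambios.foldl (fun d p => d.modify p.1 [] (fun vs => vs ++ [p.2])) PySem.Dict.empty
  grupos.items.map (fun kv =>
    (kv.1, ((PySem.List.min? kv.2 (fun x => x)).getD 0, (PySem.List.max? kv.2 (fun x => x)).getD 0)))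

-- ===== PRECONDITION & SPEC =====
def Spec_stock_productos (stock_cambios : List (String × Int)) (out : List (String × Int × Int)) : Prop := out = stock_productos_alt stock_cambios
instance (stock_cambios : List (String × Int)) (out : List (String × Int × Int)) : Decidable (Spec_stock_productos stock_cambios out) := by unfold Spec_stock_productos; infer_instance

-- ===== CLAIM (what is proved, stated in full; the proofs are below) =====
def Claim_equal_stock_productos : Prop := ∀ (stock_cambios : List (String × Int)), Dom_stock_productos stock_cambios → Spec_stock_productos stock_cambios (stock_productos stock_cambios)

-- ===== LEMMAS AND PROOFS =====

-- the net effect of A's loop body on the stored value for a key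
def pvStep1 (o : Option (Int × Int)) (s : Int) : Int × Int :=
  match o with
  | none => (s, s)
  | some (mn, mx) => if s < mn then (s, mx) else if s > mx then (mn, s) else (mn, mx)

def pvRun (o : Option (Int × Int)) (vs : List Int) : Option (Int × Int) :=
  vs.foldl (fun o s => some (pvStep1 o s)) o

theorem pvStepA_nodup (d : PySem.Dict String (Int × Int)) (p : String × Int)
    (h : d.keys.Nodup) : (pvStepA d p).keys.Nodup := by
  unfold pvStepA
  dsimp only
  split_ifs <;> first
    | exact PySem.Dict.nodup_keys_insert _ _ _ h
    | exact PySem.Dict.nodup_keys_insert _ _ _ (PySem.Dict.nodup_keys_insert _ _ _ h)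
    | exact h

theorem pvStepA_keys (d : PySem.Dict String (Int × Int)) (p : String × Int) :
    (pvStepA d p).keys = PySem.Set.add d.keys p.1 := by
  unfold pvStepA
  dsimp only
  by_cases hc : d.contains p.1
  · have hm : p.1 ∈ d.keys := (PySem.Dict.contains_iff_mem_keys d p.1).mp hc
    have hk1 : ∀ v : Int × Int, (d.insert p.1 v).keys = d.keys :=
      fun v => PySem.Dict.keys_insert_of_contains d v hc
    have hk2 : ∀ v w : Int × Int, ((d.insert p.1 v).insert p.1 w).keys = d.keys := by
      intro v w
      rw [PySem.Dict.keys_insert_of_contains _ w (PySem.Dict.contains_insert_self d p.1 v), hk1]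
    rw [if_neg (by simp [hc]), PySem.Set.add_of_mem hm]
    split_ifs <;> simp [hk1, hk2]
  · have hc' : d.contains p.1 = false := by simpa using hc
    have hm : p.1 ∉ d.keys := fun hmem => hc ((PySem.Dict.contains_iff_mem_keys d p.1).mpr hmem)
    rw [if_pos hc', PySem.Dict.keys_insert_of_not_contains d _ hc', PySem.Set.add_of_not_mem hm]

theorem pvStepA_get? (d : PySem.Dict String (Int × Int)) (p : String × Int) (c : String) :
    (pvStepA d p).get? c = if c = p.1 then some (pvStep1 (d.get? p.1) p.2) else d.get? c := by
  by_cases hc : d.contains p.1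
  · have hs : (d.get? p.1).isSome := by rw [← PySem.Dict.contains_eq_isSome_get?, hc]
    obtain ⟨v, hv⟩ := Option.isSome_iff_exists.mp hs
    obtain ⟨mn, mx⟩ := v
    unfold pvStepA
    dsimp only
    rw [if_neg (by simp [hc]), PySem.Dict.getD_of_get?_eq_some _ _ hv, hv]
    simp only [pvStep1]
    split_ifs <;> simp_all [PySem.Dict.get?_insert] 
  · have hc' : d.contains p.1 = false := by simpa using hc
    have hget : d.get? p.1 = none := by
      have h := PySem.Dict.contains_eq_isSome_get? d p.1
      rw [hc'] at h
      cases hg : d.get? p.1 with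
      | none => rfl
      | some v => rw [hg] at h; simp at h
    unfold pvStepA
    dsimp only
    rw [if_pos hc', PySem.Dict.get?_insert, hget]
    rfl

theorem foldl_stepA_keys (l : List (String × Int)) (d : PySem.Dict String (Int × Int)) :
    (l.foldl pvStepA d).keys = PySem.Set.update d.keys (l.map (·.1)) := by
  induction l generalizing d with
  | nil => simp [PySem.Set.update_nil]
  | cons p t ih =>
    simp only [List.foldl_cons, List.map_cons, PySem.Set.update_cons]
    rw [ih, pvStepA_keys]

theorem foldl_stepA_nodup (l : List (String × Int)) (d : PySem.Dict String (Int × Int))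
    (h : d.keys.Nodup) : (l.foldl pvStepA d).keys.Nodup := by
  induction l generalizing d with
  | nil => exact h
  | cons p t ih => exact ih _ (pvStepA_nodup _ _ h)

theorem foldl_stepA_get? (l : List (String × Int)) (d : PySem.Dict String (Int × Int))
    (c : String) :
    (l.foldl pvStepA d).get? c = pvRun (d.get? c) ((l.filter (fun p => p.1 == c)).map (·.2)) := by
  induction l generalizing d with
  | nil => rfl
  | cons p t ih =>
    simp only [List.foldl_cons, List.filter_cons]
    by_cases heq : p.1 = c
    · have hb : (p.1 == c) = true := by simp [heq]
      rw [hb]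
      simp only [if_true, List.map_cons]
      rw [ih _, pvStepA_get? _ _ _, if_pos heq.symm, heq]
      rfl
    · have hb : (p.1 == c) = true ↔ False := by simp [heq]
      simp only [hb, if_false]
      rw [ih _, pvStepA_get? _ _ _, if_neg (fun h => heq h.symm)]

theorem pvRun_minmax (vs : List Int) (mn mx : Int) (h : mn ≤ mx) :
    pvRun (some (mn, mx)) vs = some (vs.foldl min mn, vs.foldl max mx) := by
  induction vs generalizing mn mx with
  | nil => rfl
  | cons s t ih =>
    simp only [pvRun, List.foldl_cons] at *
    have hstep : pvStep1 (some (mn, mx)) s = (min mn s, max mx s) := by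
      simp only [pvStep1]
      split_ifs <;> simp <;> omega
    rw [hstep, ih _ _ (by omega)]

theorem pvRun_none_cons (v : Int) (rest : List Int) :
    pvRun none (v :: rest) = some (rest.foldl min v, rest.foldl max v) := by
  have : pvRun none (v :: rest) = pvRun (some (v, v)) rest := rfl
  rw [this, pvRun_minmax rest v v le_rfl]

-- ===== VERDICT (by name: the statement is the Claim_ definition above) =====
theorem stock_productos_spec : Claim_equal_stock_productos := by
  intro l _
  unfold Spec_stock_productos stock_productos stock_productos_alt
  dsimp only
  set dA := l.foldl pvStepA PySem.Dict.empty with hdA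
  set dB := l.foldl (fun d p => d.modify p.1 [] (fun vs => vs ++ [p.2])) PySem.Dict.empty with hdB
  have hndA : dA.keys.Nodup := foldl_stepA_nodup l _ (by simp [PySem.Dict.keys_empty])
  have hndB : dB.keys.Nodup := PySem.Dict.nodup_keys_foldl_modify_key l _ _ _ _ (by simp [PySem.Dict.keys_empty])
  have hkeys : dA.keys = dB.keys := by
    rw [hdA, hdB, foldl_stepA_keys, PySem.Dict.keys_foldl_modify_key]
    rfl
  rw [PySem.Dict.items_eq_map_keys dA hndA (0, 0),
      PySem.Dict.items_eq_map_keys dB hndB [], hkeys, List.map_map]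
  apply List.map_congr_left
  intro k hk
  have hgB : dB.getD k [] = (l.filter (fun p => p.1 == k)).map (·.2) := by
    rw [hdB, PySem.Dict.getD_foldl_modify_append, PySem.Dict.getD_empty]
    simp
  have hkmem : k ∈ l.map (·.1) := by
    have h := hkeys ▸ hk
    rw [hdA, foldl_stepA_keys] at h
    simpa [PySem.Set.mem_update, PySem.Dict.keys_empty] using h
  obtain ⟨v, rest, hg⟩ : ∃ v rest, (l.filter (fun p => p.1 == k)).map (·.2) = v :: rest := by
    obtain ⟨p, hp, hpk⟩ := List.mem_map.mp hkmem
    have hpf : p ∈ l.filter (fun p => p.1 == k) := by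
      simp [List.mem_filter, hp, hpk]
    cases hf : (l.filter (fun p => p.1 == k)).map (·.2) with
    | nil =>
      exfalso
      have hmem : p.2 ∈ (l.filter (fun p => p.1 == k)).map (·.2) := List.mem_map.mpr ⟨p, hpf, rfl⟩
      rw [hf] at hmem
      exact absurd hmem (List.not_mem_nil)
    | cons v rest => exact ⟨v, rest, rfl⟩
  have hgA : dA.get? k = some (rest.foldl min v, rest.foldl max v) := by
    rw [hdA, foldl_stepA_get? l _ k,
        PySem.Dict.get?_empty, hg, pvRun_none_cons]
  have hAval : dA.getD k (0, 0) = (rest.foldl min v, rest.foldl max v) :=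
    PySem.Dict.getD_of_get?_eq_some _ _ hgA
  simp only [Function.comp, hgB, hg, hAval,
    PySem.List.min?_id_cons, PySem.List.max?_id_cons, Option.getD_some]
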